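-- pv_equiv track=rewrite | github.com/pypi-data/pypi-mirror-371 | packages/darkgray_dev_tools/darkgray_dev_tools-0.3.0-py3-none-any.whl/darkgray_dev_tools/version_replace.py | replace_spans
-- ===== SOURCE A (Python) =====
-- def replace_spans(spans: list[tuple[int, int]], replacement: str, content: str) -> str:
--     """Replace given spans in a string with the desired replacement string.
--
--     :param spans: The spans to replace
--     :param replacement: The string to use as the replacement
--     :param content: The content to replace the span in
--     :return: The result after the replacement
--
--     >>> replace_spans([(2, 4), (6, 8)], "BAR", "__FU__FU__")
--     '__BAR__BAR__'
--
--     """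
--     parts = []
--     for (_, end1), (start2, end2) in zip(
--         [(..., 0), *spans], [*spans, (len(content), ...)]
--     ):
--         parts.append(content[end1:start2])
--         if end2 is not ...:
--             parts.append(replacement)
--     return "".join(parts)
-- ===== SOURCE B (Python) =====
-- def replace_spans(spans: list[tuple[int, int]], replacement: str, content: str) -> str:
--     """Replace given spans in a string with the desired replacement string."""
--     bounds = [0, *[b for span in spans for b in span], len(content)]
--
--     def gaps(bs):
--         if not bs:
--             return []
--         return [content[bs[0]:bs[1]]] + gaps(bs[2:])
--
--     return replacement.join(gaps(bounds))
-- ===== Notes on version B (the rewrite author's own statement) =====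
-- stated objective: alternative
-- what changed: Instead of zipping shifted span lists with Ellipsis sentinels and appending the replacement into a parts list joined by '', B flattens the spans into one flat boundary list [0, s1, e1, ..., sn, en, len(content)], consumes it recursively two boundaries at a time to produce only the gap slices, and interleaves the replacement via str.join's separator semantics.
import Mathlib
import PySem

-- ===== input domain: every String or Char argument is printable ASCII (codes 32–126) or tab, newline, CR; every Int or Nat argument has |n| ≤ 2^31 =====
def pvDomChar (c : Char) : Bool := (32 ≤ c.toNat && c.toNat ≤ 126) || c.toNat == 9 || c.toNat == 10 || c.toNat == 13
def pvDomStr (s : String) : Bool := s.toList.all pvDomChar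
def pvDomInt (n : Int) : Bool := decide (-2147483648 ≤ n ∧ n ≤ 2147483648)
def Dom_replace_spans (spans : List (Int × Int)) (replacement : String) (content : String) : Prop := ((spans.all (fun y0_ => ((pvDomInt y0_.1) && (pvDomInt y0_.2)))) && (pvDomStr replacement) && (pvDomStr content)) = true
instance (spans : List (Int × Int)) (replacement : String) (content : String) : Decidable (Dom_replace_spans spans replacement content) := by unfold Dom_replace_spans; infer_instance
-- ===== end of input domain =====

-- B flattens the spans into one flat boundary list, consumes it recursively two
-- boundaries at a time to produce only the gap slices, and interleaves the
-- replacement via join's separator semantics (objective: alternative).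


-- ===== PORT A =====
-- A zips [(..., 0), *spans] with [*spans, (len(content), ...)]; the Ellipsis
-- sentinels become Option's none (the '_' slot of the left pairs and the
-- 'is not ...'-tested slot of the right pairs are Option Int).
def replace_spans (spans : List (Int × Int)) (replacement : String) (content : String) : String :=
  let cs := content.toList
  let left : List (Option Int × Int) := (none, 0) :: spans.map (fun p => (some p.1, p.2))
  let right : List (Int × Option Int) := spans.map (fun p => (p.1, some p.2)) ++ [((cs.length : Int), none)]
  let parts : List (List Char) := (left.zip right).foldl
    (fun parts pr =>
      let parts := parts ++ [PySem.List.slice cs (some pr.1.2) (some pr.2.1)]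
      match pr.2.2 with
      | some _ => parts ++ [replacement.toList]   -- end2 is not ...
      | none   => parts) []
  String.mk (PySem.Chars.join [] parts)           -- "".join(parts)

-- ===== PORT B =====
-- Source B's recursive 'gaps': consume the flat boundary list two at a time.
-- bounds always has even length, so Source B's bs[0]/bs[1] never raise; the
-- unreachable singleton case is mapped to [] here.
def pvGapsOf (cs : List Char) : List Int → List (List Char)
  | a :: b :: rest => PySem.List.slice cs (some a) (some b) :: pvGapsOf cs rest
  | _ => []

def replace_spans_alt (spans : List (Int × Int)) (replacement : String) (content : String) : String :=
  let cs := content.toList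
  -- bounds = [0, *[b for span in spans for b in span], len(content)]
  let bounds : List Int := 0 :: (spans.flatMap (fun p => [p.1, p.2]) ++ [(cs.length : Int)])
  String.mk (PySem.Chars.join replacement.toList (pvGapsOf cs bounds))   -- replacement.join(gaps(bounds))

-- ===== PRECONDITION & SPEC =====
def Spec_replace_spans (spans : List (Int × Int)) (replacement : String) (content : String) (out : String) : Prop := out = replace_spans_alt spans replacement content
instance (spans : List (Int × Int)) (replacement : String) (content : String) (out : String) : Decidable (Spec_replace_spans spans replacement content out) := by unfold Spec_replace_spans; infer_instance

-- ===== CLAIM (what is proved, stated in full; the proofs are below) =====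
def Claim_equal_replace_spans : Prop := ∀ (spans : List (Int × Int)) (replacement : String) (content : String), Dom_replace_spans spans replacement content → Spec_replace_spans spans replacement content (replace_spans spans replacement content)

-- ===== LEMMAS AND PROOFS =====

-- the gap-slice list, as a recursion over the spans with a running previous end
def pvGaps (cs : List Char) : List (Int × Int) → Int → List (List Char)
  | [], prev => [PySem.List.slice cs (some prev) none]
  | (s, e) :: rest, prev =>
      PySem.List.slice cs (some prev) (some s) :: pvGaps cs rest e

-- a slice up to len(content) is a slice to the end
theorem pv_slice_len (xs : List Char) (a : Int) :
    PySem.List.slice xs (some a) (some (xs.length : Int)) = PySem.List.slice xs (some a) none := by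
  simp [PySem.List.slice, PySem.List.clampIdx]
  split_ifs <;> omega

theorem pvGaps_ne_nil (cs : List Char) (spans : List (Int × Int)) (prev : Int) :
    pvGaps cs spans prev ≠ [] := by
  cases spans with
  | nil => simp [pvGaps]
  | cons sp rest => cases sp; simp [pvGaps]

-- A's parts list is the gap list with the replacement interspersed
theorem pvA_char (cs repl : List Char) (spans : List (Int × Int)) :
    ∀ (o : Option Int) (prev : Int) (acc : List (List Char)),
    ((((o, prev) :: spans.map (fun p => (some p.1, p.2))).zip
        (spans.map (fun p => (p.1, some p.2)) ++ [((cs.length : Int), none)])).foldl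
      (fun parts pr =>
        let parts := parts ++ [PySem.List.slice cs (some pr.1.2) (some pr.2.1)]
        match pr.2.2 with
        | some _ => parts ++ [repl]
        | none   => parts) acc)
    = acc ++ List.intersperse repl (pvGaps cs spans prev) := by
  induction spans with
  | nil =>
      intro o prev acc
      simp [pvGaps, pv_slice_len]
  | cons sp rest ih =>
      intro o prev acc
      simp only [List.map_cons, List.cons_append, List.zip_cons_cons, List.foldl_cons]
      rw [ih (some sp.1) sp.2]
      obtain ⟨g, gs, hg⟩ := List.exists_cons_of_ne_nil (pvGaps_ne_nil cs rest sp.2)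
      cases sp
      simp [pvGaps, hg]

-- B's recursion over the flat boundary list produces the same gap list
theorem pvB_char (cs : List Char) (spans : List (Int × Int)) :
    ∀ (prev : Int),
    pvGapsOf cs (prev :: (spans.flatMap (fun p => [p.1, p.2]) ++ [(cs.length : Int)]))
    = pvGaps cs spans prev := by
  induction spans with
  | nil => intro prev; simp [pvGapsOf, pvGaps, pv_slice_len]
  | cons sp rest ih =>
      intro prev
      cases sp
      simp only [List.flatMap_cons, List.cons_append, List.append_assoc]
      simp [pvGapsOf, pvGaps, ih]

-- interspersing the empty separator does not change the flattened result
theorem pv_flatten_intersperse_nil (xs : List (List Char)) :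
    (List.intersperse ([] : List Char) xs).flatten = xs.flatten := by
  induction xs with
  | nil => rfl
  | cons x rest ih =>
      cases rest with
      | nil => rfl
      | cons y t =>
          simp only [List.intersperse, List.flatten_cons] at *
          simp [ih]

-- ===== VERDICT (by name: the statement is the Claim_ definition above) =====
theorem replace_spans_spec : Claim_equal_replace_spans := by
  intro spans replacement content _
  unfold Spec_replace_spans replace_spans replace_spans_alt
  dsimp only
  rw [pvA_char, pvB_char]
  simp [PySem.Chars.join, List.intercalate, pv_flatten_intersperse_nil]
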